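-- pv_equiv track=rewrite | github.com/VieriMansyl/Algeo02-20092 | svd.py | createFinalMat
-- ===== SOURCE A (Python) =====
-- def createFinalMat(value, mat, nrow, ncol):
-- 	copyMat = []
-- 	for i in range(nrow):
-- 		eachrow = []
-- 		for j in range(ncol):  # Get constanta
-- 			if(i == j):
-- 				eachrow.append(value - mat[i][i]) #Convert every diagonal
-- 			else:
-- 				eachrow.append(-mat[i][j])
-- 		eachrow.append(0)
-- 		copyMat.append(eachrow)
--
-- 	return copyMat
-- ===== SOURCE B (Python) =====
-- def createFinalMat(value, mat, nrow, ncol):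
--     if nrow <= 0:
--         return []
--     # Column-major construction: build each column of value*I - mat, add the
--     # all-zero extra column, then transpose with zip to get the row-major result.
--     columns = [[(value if i == j else 0) - mat[i][j] for i in range(nrow)]
--                for j in range(ncol)]
--     columns.append([0] * nrow)
--     return [list(row) for row in zip(*columns)]
-- ===== Notes on version B (the rewrite author's own statement) =====
-- stated objective: alternative
-- what changed: Builds the result column-by-column (each column of value*I - mat, plus one literal zero column) and transposes with zip(*columns), instead of A's row-by-row loop that appends a 0 to every row; Pre_ excludes only the inputs on which A raises IndexError (ncol > 0 with nrow exceeding the row count or a row shorter than ncol).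
import Mathlib
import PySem

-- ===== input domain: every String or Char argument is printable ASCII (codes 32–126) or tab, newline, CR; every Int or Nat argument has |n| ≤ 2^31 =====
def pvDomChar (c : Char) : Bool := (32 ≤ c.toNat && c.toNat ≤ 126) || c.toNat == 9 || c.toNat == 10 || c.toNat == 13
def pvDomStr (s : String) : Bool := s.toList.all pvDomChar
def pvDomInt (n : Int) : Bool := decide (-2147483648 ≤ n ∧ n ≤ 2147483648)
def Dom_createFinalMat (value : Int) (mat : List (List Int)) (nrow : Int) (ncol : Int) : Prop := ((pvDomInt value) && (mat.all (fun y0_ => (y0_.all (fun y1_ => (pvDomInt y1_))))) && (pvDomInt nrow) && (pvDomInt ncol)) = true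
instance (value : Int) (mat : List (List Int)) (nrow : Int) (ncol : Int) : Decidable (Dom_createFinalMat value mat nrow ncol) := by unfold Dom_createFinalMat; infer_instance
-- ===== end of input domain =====

-- B builds the result column-by-column (columns of value*I - mat plus a zero
-- column) and transposes with zip, instead of A's row-by-row append loop.

-- ===== PORT A =====
def createFinalMat (value : Int) (mat : List (List Int)) (nrow : Int) (ncol : Int) : List (List Int) :=
  (PySem.List.pyRange 0 nrow 1).foldl (fun copyMat i =>
    let eachrow :=
      (PySem.List.pyRange 0 ncol 1).foldl (fun eachrow j =>
        if i = j then
          eachrow ++ [value - PySem.List.pyGetD (PySem.List.pyGetD mat i []) i 0]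
        else
          eachrow ++ [-PySem.List.pyGetD (PySem.List.pyGetD mat i []) j 0]) []
    copyMat ++ [eachrow ++ [0]]) []

-- ===== PORT B =====
-- zip(*cols): rows indexed up to the minimum column length (exact for zip over lists)
def pvZipStar (cols : List (List Int)) : List (List Int) :=
  match (cols.map List.length).min? with
  | none => []
  | some m => (List.range m).map (fun r => cols.map (fun c => c.getD r 0))

def createFinalMat_alt (value : Int) (mat : List (List Int)) (nrow : Int) (ncol : Int) : List (List Int) :=
  if nrow ≤ 0 then [] else
  -- columns of value*I - mat, plus '[0] * nrow' (List.replicate _.toNat: empty for nrow ≤ 0, exactly Python's list repetition), then zip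
  pvZipStar
    (((PySem.List.pyRange 0 ncol 1).map (fun j =>
        (PySem.List.pyRange 0 nrow 1).map (fun i =>
          (if i = j then value else 0) - PySem.List.pyGetD (PySem.List.pyGetD mat i []) j 0)))
      ++ [List.replicate nrow.toNat 0])

-- ===== PRECONDITION & SPEC =====
-- Pre_ excludes exactly the inputs on which the Python A raises IndexError:
-- 0 < ncol together with nrow exceeding the number of rows, or some of the
-- first nrow rows shorter than ncol.
def Pre_createFinalMat (value : Int) (mat : List (List Int)) (nrow : Int) (ncol : Int) : Prop :=
  0 < ncol → (nrow ≤ (mat.length : Int) ∧ ∀ row ∈ mat.take nrow.toNat, ncol ≤ (row.length : Int))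
instance (value : Int) (mat : List (List Int)) (nrow : Int) (ncol : Int) : Decidable (Pre_createFinalMat value mat nrow ncol) := by unfold Pre_createFinalMat; infer_instance

def pvWitness_createFinalMat : Int × List (List Int) × Int × Int := (2, [[1, 2], [3, 4]], 2, 2)

def Spec_createFinalMat (value : Int) (mat : List (List Int)) (nrow : Int) (ncol : Int) (out : List (List Int)) : Prop := out = createFinalMat_alt value mat nrow ncol
instance (value : Int) (mat : List (List Int)) (nrow : Int) (ncol : Int) (out : List (List Int)) : Decidable (Spec_createFinalMat value mat nrow ncol out) := by unfold Spec_createFinalMat; infer_instance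

-- ===== CLAIM (what is proved, stated in full; the proofs are below) =====
def Claim_equal_createFinalMat : Prop := ∀ (value : Int) (mat : List (List Int)) (nrow : Int) (ncol : Int), Dom_createFinalMat value mat nrow ncol → Pre_createFinalMat value mat nrow ncol → Spec_createFinalMat value mat nrow ncol (createFinalMat value mat nrow ncol)

-- ===== LEMMAS AND PROOFS =====

-- entry (i,j) of mat as both programs read it (total form; in range under Pre_)
def pvGet (mat : List (List Int)) (i j : Nat) : Int := (mat.getD i []).getD j 0

-- the row A builds for row index i
def pvRowA (value : Int) (mat : List (List Int)) (c : Nat) (i : Nat) : List Int :=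
  (List.range c).map (fun j => if i = j then value - pvGet mat i i else -pvGet mat i j) ++ [0]

-- 'if p then acc ++ [f x] else acc ++ [g x]' loop = map of the merged if
lemma pv_foldl_ite_append {β α : Type} (l : List β) (p : β → Prop) [DecidablePred p]
    (f g : β → α) (acc : List α) :
    l.foldl (fun a x => if p x then a ++ [f x] else a ++ [g x]) acc
      = acc ++ l.map (fun x => if p x then f x else g x) := by
  induction l generalizing acc with
  | nil => simp
  | cons x xs ih => by_cases h : p x <;> simp [h, ih]

lemma pv_A_eq (value : Int) (mat : List (List Int)) (nrow ncol : Int) :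
    createFinalMat value mat nrow ncol
      = (List.range nrow.toNat).map (pvRowA value mat ncol.toNat) := by
  simp only [createFinalMat]
  rw [PySem.List.pyRange_one, PySem.List.pyRange_one]
  simp only [sub_zero, zero_add, List.foldl_map]
  rw [PySem.List.foldl_append_singleton_eq_map]
  simp only [List.nil_append]
  refine List.map_congr_left (fun i _ => ?_)
  rw [pv_foldl_ite_append]
  simp [pvRowA, pvGet, Nat.cast_inj]

lemma pv_getD_map_range {α : Type} (f : Nat → α) (n r : Nat) (d : α) (h : r < n) :
    ((List.range n).map f).getD r d = f r := by
  rw [List.getD_eq_getElem _ _ (by simp [h])]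
  simp

lemma pv_foldl_min_replicate (m n : Nat) : (List.replicate m n).foldl min n = n := by
  induction m with
  | zero => simp
  | succ m ih => simp [List.replicate_succ, ih]

lemma pv_min?_replicate (k n : Nat) : (List.replicate (k + 1) n).min? = some n := by
  rw [List.replicate_succ, List.min?_cons', pv_foldl_min_replicate]

lemma pv_B_eq (value : Int) (mat : List (List Int)) (nrow ncol : Int) (hpos : ¬ nrow ≤ 0) :
    createFinalMat_alt value mat nrow ncol
      = (List.range nrow.toNat).map (fun r =>
          (List.range ncol.toNat).map
            (fun j => (if r = j then value else 0) - pvGet mat r j) ++ [0]) := by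
  set n := nrow.toNat
  set c := ncol.toNat
  have hcols :
      ((PySem.List.pyRange 0 ncol 1).map (fun j =>
        (PySem.List.pyRange 0 nrow 1).map (fun i =>
          (if i = j then value else 0) - PySem.List.pyGetD (PySem.List.pyGetD mat i []) j 0)))
      = (List.range c).map (fun j =>
          (List.range n).map (fun i => (if i = j then value else 0) - pvGet mat i j)) := by
    rw [PySem.List.pyRange_one, PySem.List.pyRange_one]
    simp only [sub_zero, zero_add, List.map_map]
    refine List.map_congr_left (fun j _ => ?_)
    simp only [Function.comp]
    refine List.map_congr_left (fun i _ => ?_)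
    simp [pvGet, Nat.cast_inj]
  unfold createFinalMat_alt pvZipStar
  rw [if_neg hpos, hcols]
  have hlen : (((List.range c).map (fun j =>
      (List.range n).map (fun i => (if i = j then value else 0) - pvGet mat i j))
        ++ [List.replicate n 0]).map List.length) = List.replicate (c + 1) n := by
    apply List.ext_getElem
    · simp
    · intro r h1 h2
      simp only [List.getElem_replicate, List.getElem_map]
      by_cases hr : r < c
      · rw [List.getElem_append_left (by simp [hr])]; simp
      · have : r = c := by simp at h1; omega
        subst this
        rw [List.getElem_append_right (by simp)]; simp
  rw [hlen, pv_min?_replicate]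
  refine List.map_congr_left (fun r hr => ?_)
  simp only [List.mem_range] at hr
  rw [List.map_append, List.map_map]
  congr 1
  · refine List.map_congr_left (fun j _ => ?_)
    simp only [Function.comp]
    rw [pv_getD_map_range _ n r _ hr]
  · simp

theorem createFinalMat_eq (value : Int) (mat : List (List Int)) (nrow ncol : Int) :
    createFinalMat value mat nrow ncol = createFinalMat_alt value mat nrow ncol := by
  by_cases hpos : nrow ≤ 0
  · have : nrow.toNat = 0 := by omega
    simp [pv_A_eq, createFinalMat_alt, hpos, this]
  rw [pv_A_eq, pv_B_eq _ _ _ _ hpos]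
  refine List.map_congr_left (fun i _ => ?_)
  unfold pvRowA
  congr 1
  refine List.map_congr_left (fun j _ => ?_)
  by_cases hij : i = j
  · subst hij; simp
  · simp [hij]

-- ===== VERDICT (by name: the statement is the Claim_ definition above) =====
theorem createFinalMat_spec : Claim_equal_createFinalMat := by
  intro value mat nrow ncol _ _
  exact createFinalMat_eq value mat nrow ncol
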